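-- pv_equiv track=rewrite | github.com/leuname1s/uade | algoritmos y estructuras de datos/proyecto/map.py | generar_cuadrado
-- ===== SOURCE A (Python) =====
-- def generar_cuadrado(lado: int):
--     matriz = []
--     for i in range(lado):
--         fila = []
--         for j in range(lado):
--             if i == 0 or i == lado - 1 or j == 0 or j == lado - 1:
--                 fila.append(1)
--             else:
--                 fila.append(0)
--         matriz.append(fila)
--     return matriz
-- ===== SOURCE B (Python) =====
-- def generar_cuadrado(lado: int):
--     if lado <= 0:
--         return []
--     if lado == 1:
--         return [[1]]
--     full = [1] * lado
--     middle = [1] + [0] * (lado - 2) + [1]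
--     return [full] + [list(middle) for _ in range(lado - 2)] + [full]
-- ===== Notes on version B (the rewrite author's own statement) =====
-- stated objective: simpler
-- what changed: B builds whole rows at once (a full ones row for the borders, [1]+zeros+[1] for the middle) by list multiplication instead of A's nested per-cell loop with a border predicate.
import Mathlib
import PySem

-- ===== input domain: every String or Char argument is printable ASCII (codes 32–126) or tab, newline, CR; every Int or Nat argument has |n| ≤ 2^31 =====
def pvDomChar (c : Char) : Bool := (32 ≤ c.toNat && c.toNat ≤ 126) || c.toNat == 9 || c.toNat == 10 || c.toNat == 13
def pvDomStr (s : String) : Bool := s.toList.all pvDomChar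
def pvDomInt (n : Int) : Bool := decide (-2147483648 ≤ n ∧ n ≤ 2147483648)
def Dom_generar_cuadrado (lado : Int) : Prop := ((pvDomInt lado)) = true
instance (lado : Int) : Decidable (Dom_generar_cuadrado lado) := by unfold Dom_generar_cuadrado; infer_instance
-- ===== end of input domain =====

-- B builds whole rows at once (ones row for borders, [1]+zeros+[1] for middle rows) instead of A's per-cell border predicate; objective: simpler.


-- ===== PORT A =====
def generar_cuadrado (lado : Int) : List (List Int) :=
  (PySem.List.pyRange 0 lado 1).foldl (fun matriz i =>
    matriz ++ [ (PySem.List.pyRange 0 lado 1).foldl (fun fila j =>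
      fila ++ [if i = 0 ∨ i = lado - 1 ∨ j = 0 ∨ j = lado - 1 then (1 : Int) else 0]) [] ]) []

-- ===== PORT B =====
def generar_cuadrado_alt (lado : Int) : List (List Int) :=
  if lado ≤ 0 then []
  else if lado = 1 then [[1]]
  else
    let full : List Int := List.replicate lado.toNat 1
    let middle : List Int := [1] ++ List.replicate (lado - 2).toNat 0 ++ [1]
    [full] ++ (List.replicate (lado - 2).toNat middle) ++ [full]

-- ===== PRECONDITION & SPEC =====
def Spec_generar_cuadrado (lado : Int) (out : List (List Int)) : Prop := out = generar_cuadrado_alt lado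
instance (lado : Int) (out : List (List Int)) : Decidable (Spec_generar_cuadrado lado out) := by unfold Spec_generar_cuadrado; infer_instance

-- ===== CLAIM (what is proved, stated in full; the proofs are below) =====
def Claim_equal_generar_cuadrado : Prop := ∀ (lado : Int), Dom_generar_cuadrado lado → Spec_generar_cuadrado lado (generar_cuadrado lado)

-- ===== LEMMAS AND PROOFS =====

-- A's result as a nested map over ranges
lemma genA_eq_map (lado : Int) : generar_cuadrado lado =
    (PySem.List.pyRange 0 lado 1).map (fun i =>
      (PySem.List.pyRange 0 lado 1).map (fun j =>
        if i = 0 ∨ i = lado - 1 ∨ j = 0 ∨ j = lado - 1 then (1 : Int) else 0)) := by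
  unfold generar_cuadrado
  rw [PySem.List.foldl_append_singleton_eq_map]
  refine List.map_congr_left (fun i _ => ?_)
  rw [PySem.List.foldl_append_singleton_eq_map]
  simp

-- a row that is all ones (i on the border)
lemma row_full (m : Nat) (f : Int → Int) (hf : ∀ j, 0 ≤ j → j < (m : Int) → f j = 1) :
    (PySem.List.pyRange 0 m 1).map f = List.replicate m (1 : Int) := by
  rw [List.eq_replicate_iff]
  constructor
  · simp [PySem.List.length_pyRange_one]
  · intro b hb
    obtain ⟨j, hj, rfl⟩ := List.mem_map.mp hb
    rw [PySem.List.mem_pyRange_one] at hj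
    exact hf j hj.1 hj.2

-- a middle row: 1, zeros, 1
lemma row_middle (m : Nat) (hm : 2 ≤ m) (f : Int → Int)
    (hf : ∀ j, 0 ≤ j → j < (m : Int) →
      f j = if j = 0 ∨ j = (m : Int) - 1 then 1 else 0) :
    (PySem.List.pyRange 0 m 1).map f = [1] ++ List.replicate (m - 2) (0 : Int) ++ [1] := by
  apply List.ext_getElem
  · simp [PySem.List.length_pyRange_one]; omega
  · intro k h1 h2
    have hk : k < m := by simpa [PySem.List.length_pyRange_one] using h1
    have hget : ((PySem.List.pyRange 0 (m : Int) 1).map f)[k] = f ((0 : Int) + k) := by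
      rw [List.getElem_map, PySem.List.getElem_pyRange_one]
    rw [hget]
    rw [hf _ (by omega) (by omega)]
    rcases Nat.lt_or_ge k 1 with hk0 | hk1
    · interval_cases k
      simp
    · rcases Nat.lt_or_ge k (m - 1) with hkm | hkm
      · have : ¬ ((0 : Int) + k = 0 ∨ (0 : Int) + k = (m : Int) - 1) := by
          push Not; constructor <;> [omega; omega]
        rw [if_neg this]
        obtain ⟨k', rfl⟩ : ∃ k', k = k' + 1 := ⟨k - 1, by omega⟩
        have hk2 : k' < m - 2 := by omega
        simp [hk2]
      · have hkeq : k = m - 1 := by omega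
        have : ((0 : Int) + k = 0 ∨ (0 : Int) + k = (m : Int) - 1) := by right; omega
        rw [if_pos this]
        obtain ⟨k', rfl⟩ : ∃ k', k = k' + 1 := ⟨k - 1, by omega⟩
        have hk2 : k' = m - 2 := by omega
        subst hk2
        simp

lemma gen_eq_of_two_le (lado : Int) (h2 : 2 ≤ lado) :
    generar_cuadrado lado = generar_cuadrado_alt lado := by
  obtain ⟨m, rfl⟩ : ∃ m : Nat, lado = (m : Int) := ⟨lado.toNat, (Int.toNat_of_nonneg (by omega)).symm⟩
  have hm : 2 ≤ m := by exact_mod_cast h2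
  rw [genA_eq_map]
  unfold generar_cuadrado_alt
  rw [if_neg (by omega), if_neg (by omega)]
  simp only [Int.toNat_natCast]
  have hsub : ((m : Int) - 2).toNat = m - 2 := by omega
  rw [hsub]
  apply List.ext_getElem
  · simp [PySem.List.length_pyRange_one]; omega
  · intro k h1 h2'
    have hk : k < m := by simpa [PySem.List.length_pyRange_one] using h1
    rw [List.getElem_map, PySem.List.getElem_pyRange_one]
    rcases Nat.lt_or_ge k 1 with hk0 | hk1
    · interval_cases k
      simp only [Nat.cast_zero, add_zero]
      rw [row_full m _ (fun j _ _ => by simp)]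
      simp
    · rcases Nat.lt_or_ge k (m - 1) with hkm | hkm
      · have hne : ¬ ((0 : Int) + k = 0) := by omega
        have hne' : ¬ ((0 : Int) + k = (m : Int) - 1) := by omega
        rw [row_middle m hm _ (fun j hj1 hj2 => by
          have ha : ¬ (k = 0) := by omega
          have hb : ¬ ((k : Int) = (m : Int) - 1) := by omega
          simp [ha, hb])]
        obtain ⟨k', rfl⟩ : ∃ k', k = k' + 1 := ⟨k - 1, by omega⟩
        have hk2 : k' < m - 2 := by omega
        simp [hk2]
      · have hpos : (0 : Int) + k = (m : Int) - 1 := by omega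
        rw [row_full m _ (fun j hj1 hj2 => by rw [if_pos (by tauto)])]
        obtain ⟨k', rfl⟩ : ∃ k', k = k' + 1 := ⟨k - 1, by omega⟩
        have hk2 : k' = m - 2 := by omega
        subst hk2
        simp

-- ===== VERDICT (by name: the statement is the Claim_ definition above) =====
theorem generar_cuadrado_spec : Claim_equal_generar_cuadrado := by
  intro lado _
  unfold Spec_generar_cuadrado
  rcases le_or_gt lado 0 with h | h
  · unfold generar_cuadrado generar_cuadrado_alt
    rw [PySem.List.pyRange_one_eq_nil (by omega), if_pos h]
    rfl
  · rcases eq_or_lt_of_le (by omega : (1 : Int) ≤ lado) with h1 | h1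
    · subst_vars; decide
    · exact gen_eq_of_two_le lado (by omega)
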